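-- pv_equiv track=rewrite | github.com/rostikmakhanko/adventofcode-2023 | 14.2.py | get_a_traversed
-- ===== SOURCE A (Python) =====
-- def get_a_traversed(a):
--     n = len(a)
--     m = len(a[0])
--     b = []
--     for j in range(m):
--         s = ""
--         for i in range(n-1, -1, -1):
--             s += a[i][j]
--         b.append(s)
--     return b
-- ===== SOURCE B (Python) =====
-- def get_a_traversed(a):
--     # Single row-major pass: start from len(a[0]) empty columns and, for each row
--     # in input order, PREPEND its j-th character to column j.  Prepending makes
--     # the columns come out bottom-to-top without ever reversing or indexing rows.
--     cols = [""] * len(a[0])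
--     for row in a:
--         cols = [row[j] + c for j, c in enumerate(cols)]
--     return cols
-- ===== Notes on version B (the rewrite author's own statement) =====
-- stated objective: alternative
-- what changed: A traverses column-major: for each column index j it scans the rows with an inner countdown loop appending characters; B traverses row-major in a single forward pass, maintaining all column accumulators at once and prepending each row's character, so there is no inner index loop and no reversed iteration.
import Mathlib
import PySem

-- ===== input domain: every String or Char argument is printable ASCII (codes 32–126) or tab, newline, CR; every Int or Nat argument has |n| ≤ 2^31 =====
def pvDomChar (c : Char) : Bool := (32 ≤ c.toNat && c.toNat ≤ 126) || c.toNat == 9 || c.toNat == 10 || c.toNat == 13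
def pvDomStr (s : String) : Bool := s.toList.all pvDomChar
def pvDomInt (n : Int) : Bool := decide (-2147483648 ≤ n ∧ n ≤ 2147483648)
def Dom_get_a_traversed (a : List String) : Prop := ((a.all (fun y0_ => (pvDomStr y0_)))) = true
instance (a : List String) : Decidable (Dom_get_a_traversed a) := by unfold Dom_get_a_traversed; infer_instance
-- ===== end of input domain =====

-- B replaces A's column-major nested index loops by one row-major pass that prepends
-- each row's character to per-column accumulators (objective: alternative, same cost).

-- ===== PORT A =====
def get_a_traversed (a : List String) : List String :=
  let n : Int := a.length
  let m : Int := ((PySem.List.pyGet? a 0).getD "").toList.length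
  (PySem.List.pyRange 0 m 1).foldl (fun b j =>
    let s : List Char := (PySem.List.pyRange (n - 1) (-1) (-1)).foldl
      (fun s i => s ++ [(PySem.Str.pyGet? (PySem.List.pyGetD a i "") j).getD ' ']) []
    b ++ [String.ofList s]) []

-- ===== PORT B =====
-- cols = [""] * len(a[0]); for row in a: cols = [row[j] + c for j, c in enumerate(cols)]
def get_a_traversed_alt (a : List String) : List String :=
  let m : Nat := ((PySem.List.pyGet? a 0).getD "").toList.length
  let cols := a.foldl (fun cols row =>
      (PySem.List.enumerate cols).map
        (fun jc => ((PySem.Str.pyGet? row jc.1).getD ' ') :: jc.2))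
    (List.replicate m ([] : List Char))
  cols.map String.ofList

-- ===== PRECONDITION & SPEC =====
-- Pre_ excludes exactly the inputs where A raises IndexError: a == [] (a[0]) or some row shorter than a[0] (a[i][j]).
def Pre_get_a_traversed (a : List String) : Prop :=
  a ≠ [] ∧ ∀ s ∈ a, (a.headD "").toList.length ≤ s.toList.length
instance (a : List String) : Decidable (Pre_get_a_traversed a) := by unfold Pre_get_a_traversed; infer_instance
def pvWitness_get_a_traversed : List String := ["OX", ".#", "#."]

def Spec_get_a_traversed (a : List String) (out : List String) : Prop := out = get_a_traversed_alt a
instance (a : List String) (out : List String) : Decidable (Spec_get_a_traversed a out) := by unfold Spec_get_a_traversed; infer_instance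

-- ===== CLAIM (what is proved, stated in full; the proofs are below) =====
def Claim_equal_get_a_traversed : Prop := ∀ (a : List String), Dom_get_a_traversed a → Pre_get_a_traversed a → Spec_get_a_traversed a (get_a_traversed a)

-- ===== LEMMAS AND PROOFS =====

-- enumerate over a range-map, starting at 0
theorem enumerate_map_range (m : Nat) (f : Nat → List Char) :
    PySem.List.enumerate ((List.range m).map f) 0 = (List.range m).map (fun (j : Nat) => ((j : Int), f j)) := by
  induction m with
  | zero => simp [PySem.List.enumerate_nil]
  | succ m ih =>
    rw [List.range_succ, List.map_append, PySem.List.enumerate_append, ih,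
        List.map_append]
    simp [PySem.List.enumerate_cons, PySem.List.enumerate_nil]

-- one step of B's fold, on a state of the shape (range m).map f, for a long-enough row
theorem step_eq (m : Nat) (f : Nat → List Char) (row : String) (h : m ≤ row.toList.length) :
    (PySem.List.enumerate ((List.range m).map f)).map
        (fun jc => ((PySem.Str.pyGet? row jc.1).getD ' ') :: jc.2)
      = (List.range m).map (fun j => row.toList.getD j ' ' :: f j) := by
  rw [enumerate_map_range, List.map_map]
  refine List.map_congr_left fun j hj => ?_
  have hj' : j < row.toList.length := lt_of_lt_of_le (List.mem_range.mp hj) h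
  simp [List.getD_eq_getElem?_getD]

-- invariant of B's row-major fold
theorem fold_inv (rows : List String) : ∀ (m : Nat) (f : Nat → List Char),
    (∀ r ∈ rows, m ≤ r.toList.length) →
    rows.foldl (fun cols row =>
        (PySem.List.enumerate cols).map
          (fun jc => ((PySem.Str.pyGet? row jc.1).getD ' ') :: jc.2))
      ((List.range m).map f)
    = (List.range m).map (fun j => (rows.reverse.map (fun r => r.toList.getD j ' ')) ++ f j) := by
  induction rows with
  | nil => intro m f _; simp
  | cons r rest ih =>
    intro m f hlen
    rw [List.foldl_cons, step_eq m f r (hlen r (by simp)),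
        ih m _ (fun t ht => hlen t (List.mem_cons_of_mem _ ht))]
    refine List.map_congr_left fun j _ => ?_
    simp

-- A's double loop, characterised as the list of bottom-up columns.
theorem get_a_traversed_eq_cols (a : List String) :
    get_a_traversed a =
      (List.range ((PySem.List.pyGet? a 0).getD "").toList.length).map
        (fun k => String.ofList (a.reverse.map (fun r => r.toList.getD k ' '))) := by
  unfold get_a_traversed
  rw [PySem.List.foldl_append_singleton_eq_map]
  simp only [List.nil_append]
  rw [PySem.List.pyRange_zero_natCast]
  rw [List.map_map]
  refine List.map_congr_left ?_
  intro k _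
  simp only [Function.comp]
  congr 1
  rw [PySem.List.foldl_append_singleton_eq_map]
  simp only [List.nil_append]
  rw [PySem.List.pyRange_neg_one_eq_reverse]
  have hsplit : (-1 : Int) + 1 = 0 := by norm_num
  rw [hsplit]
  have h1 : ((a.length : Int) - 1) + 1 = (a.length : Int) := by ring
  rw [h1, List.map_reverse]
  have hmid : (PySem.List.pyRange 0 (a.length : Int) 1).map
      (fun i => (PySem.Str.pyGet? (PySem.List.pyGetD a i "") (k : Int)).getD ' ')
      = ((PySem.List.pyRange 0 (a.length : Int) 1).map (fun i => PySem.List.pyGetD a i "")).map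
        (fun r => (PySem.Str.pyGet? r (k : Int)).getD ' ') := by
    rw [List.map_map]; rfl
  rw [hmid, PySem.List.map_pyGetD_pyRange_zero', ← List.map_reverse]
  refine List.map_congr_left fun r _ => ?_
  rw [PySem.Str.pyGet?_natCast]
  simp [List.getD_eq_getElem?_getD]

-- ===== VERDICT (by name: the statement is the Claim_ definition above) =====
theorem get_a_traversed_spec : Claim_equal_get_a_traversed := by
  intro a _ hpre
  obtain ⟨hne, hlen⟩ := hpre
  unfold Spec_get_a_traversed
  cases a with
  | nil => exact absurd rfl hne
  | cons s rest =>
    have halt : get_a_traversed_alt (s :: rest)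
        = ((s :: rest).foldl (fun cols row =>
            (PySem.List.enumerate cols).map
              (fun jc => ((PySem.Str.pyGet? row jc.1).getD ' ') :: jc.2))
          ((List.range s.toList.length).map (fun _ => ([] : List Char)))).map String.ofList := by
      simp [get_a_traversed_alt, List.map_const']
    rw [get_a_traversed_eq_cols, halt,
        fold_inv (s :: rest) s.toList.length _ (by simpa using hlen)]
    rw [List.map_map]
    have hget0 : (PySem.List.pyGet? (s :: rest) 0).getD "" = s := by simp
    rw [hget0]
    refine List.map_congr_left fun k _ => ?_
    simp
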